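-- pv_equiv track=rewrite | github.com/jennyzzt/LLM_debate_on_ARC | ARC_gen_agents3_rounds2_openai/a85d4709/agent1/algo.py | solve
-- ===== SOURCE A (Python) =====
-- def solve(input_grid):
--     # Initialize the output grid with zeros, same size as input_grid
--     size = len(input_grid)
--     output_grid = [[0 for _ in range(size)] for _ in range(size)]
--
--     # Function to count non-zero elements in a row
--     def count_non_zero_row(row):
--         return sum(1 for cell in input_grid[row] if cell != 0)
--
--     # Function to count non-zero elements in a column
--     def count_non_zero_col(col):
--         return sum(1 for row in input_grid if row[col] != 0)
--
--     # Fill the output grid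
--     for row in range(size):
--         for col in range(size):
--             # Count non-zero elements in the corresponding row and column
--             row_count = count_non_zero_row(row)
--             col_count = count_non_zero_col(col)
--             # Subtract 1 if the current cell in input_grid is non-zero (to avoid double counting)
--             if input_grid[row][col] != 0:
--                 output_grid[row][col] = row_count + col_count - 1
--             else:
--                 output_grid[row][col] = row_count + col_count
--
--     return output_grid
-- ===== SOURCE B (Python) =====
-- def solve(input_grid):
--     size = len(input_grid)
--     # Precompute counts once (A recomputes them per cell).
--     row_counts = [sum(1 for cell in row if cell != 0) for row in input_grid]
--     col_counts = [sum(1 for row in input_grid if row[c] != 0) for c in range(size)]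
--     output_grid = []
--     for r in range(size):
--         output_grid.append([row_counts[r] + col_counts[c]
--                             - (1 if input_grid[r][c] != 0 else 0)
--                             for c in range(size)])
--     return output_grid
-- ===== Notes on version B (the rewrite author's own statement) =====
-- stated objective: faster
-- what changed: Precompute the per-row and per-column nonzero counts once and fill the grid from those tables, instead of rescanning the whole row and column for every cell.
import Mathlib
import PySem

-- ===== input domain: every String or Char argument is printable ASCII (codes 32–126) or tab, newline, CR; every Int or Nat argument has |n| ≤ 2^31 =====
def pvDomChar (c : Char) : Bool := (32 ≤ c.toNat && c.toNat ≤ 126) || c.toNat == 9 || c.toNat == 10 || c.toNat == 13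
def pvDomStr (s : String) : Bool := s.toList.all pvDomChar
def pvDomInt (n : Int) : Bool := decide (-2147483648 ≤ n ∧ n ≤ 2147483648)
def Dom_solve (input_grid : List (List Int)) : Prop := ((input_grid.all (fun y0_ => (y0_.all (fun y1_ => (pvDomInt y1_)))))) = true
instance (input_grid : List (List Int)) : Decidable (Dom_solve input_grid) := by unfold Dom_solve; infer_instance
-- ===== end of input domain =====

-- B precomputes row/column nonzero counts once and fills from the tables (A rescans per cell); same return value.


-- ===== PORT A =====
-- count_non_zero_row: sum(1 for cell in input_grid[row] if cell != 0)
def countNonZeroRow (input_grid : List (List Int)) (row : Nat) : Int :=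
  (input_grid[row]?.getD []).foldl (fun a cell => if cell != 0 then a + 1 else a) 0

-- count_non_zero_col: sum(1 for row in input_grid if row[col] != 0); row[col] is in range inside Pre_solve
def countNonZeroCol (input_grid : List (List Int)) (col : Nat) : Int :=
  input_grid.foldl (fun a row => if (row[col]?.getD 0) != 0 then a + 1 else a) 0

def solve (input_grid : List (List Int)) : List (List Int) :=
  let size := input_grid.length
  (List.range size).map (fun row =>
    (List.range size).map (fun col =>
      let row_count := countNonZeroRow input_grid row
      let col_count := countNonZeroCol input_grid col
      if ((input_grid[row]?.getD [])[col]?.getD 0) != 0 then row_count + col_count - 1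
      else row_count + col_count))

-- ===== PORT B =====
def solve_alt (input_grid : List (List Int)) : List (List Int) :=
  let size := input_grid.length
  let row_counts := input_grid.map (fun row => (row.countP (fun cell => cell != 0) : Int))
  let col_counts := (List.range size).map
    (fun c => (input_grid.countP (fun row => (row[c]?.getD 0) != 0) : Int))
  (List.range size).map (fun r =>
    (List.range size).map (fun c =>
      row_counts[r]?.getD 0 + col_counts[c]?.getD 0 -
        (if ((input_grid[r]?.getD [])[c]?.getD 0) != 0 then 1 else 0)))

-- ===== PRECONDITION & SPEC =====
-- Pre_solve excludes ragged grids with a row shorter than the grid's height, on which Python A raises IndexError.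
def Pre_solve (input_grid : List (List Int)) : Prop :=
  ∀ row ∈ input_grid, input_grid.length ≤ row.length
instance (input_grid : List (List Int)) : Decidable (Pre_solve input_grid) := by
  unfold Pre_solve; infer_instance
def pvWitness_solve : List (List Int) := [[1, 0], [0, 2]]
def Spec_solve (input_grid : List (List Int)) (out : List (List Int)) : Prop := out = solve_alt input_grid
instance (input_grid : List (List Int)) (out : List (List Int)) : Decidable (Spec_solve input_grid out) := by unfold Spec_solve; infer_instance

-- ===== CLAIM (what is proved, stated in full; the proofs are below) =====
def Claim_equal_solve : Prop := ∀ (input_grid : List (List Int)), Dom_solve input_grid → Pre_solve input_grid → Spec_solve input_grid (solve input_grid)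

-- ===== LEMMAS AND PROOFS =====
theorem foldl_count_if {α : Type} (p : α → Bool) (l : List α) (a : Int) :
    l.foldl (fun a x => if p x then a + 1 else a) a = a + (l.countP p : Int) := by
  induction l generalizing a with
  | nil => simp
  | cons x xs ih =>
    simp only [List.foldl_cons, List.countP_cons, ih]
    by_cases h : p x = true <;> simp [h, Int.add_comm, Int.add_assoc, Int.add_left_comm]

-- ===== VERDICT (by name: the statement is the Claim_ definition above) =====
theorem solve_spec : Claim_equal_solve := by
  intro g _ _
  show solve g = solve_alt g
  unfold solve solve_alt
  apply List.map_congr_left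
  intro r hr
  apply List.map_congr_left
  intro c hc
  simp only [List.mem_range] at hr hc
  simp only [countNonZeroRow, countNonZeroCol, foldl_count_if,
    List.getElem?_map, List.getElem?_range, hc]
  rcases hg : g[r]? with _ | row
  · simp at hg; omega
  · simp
    split <;> ring
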